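-- pv_equiv track=rewrite | github.com/anhyunjunKAISTEE/designcon2025_ver3 | reward_utils_2.py | via_util_is_same_or_rotate
-- ===== SOURCE A (Python) =====
-- def via_util_rotate90(matrix):
--     return [list(reversed(col)) for col in zip(*matrix)]
--
-- def via_util_rotate180(matrix):
--     return [list(reversed(row)) for row in reversed(matrix)]
--
-- def via_util_rotate270(matrix):
--     return [list(col) for col in zip(*matrix[::-1])]
--
-- def via_util_flip_horizontal(matrix):
--     return [list(reversed(row)) for row in matrix]
--
-- def via_util_flip_vertical(matrix):
--     return list(reversed(matrix))
--
-- def via_util_is_same_or_rotate(matrix1, matrix2):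
--     transformations = [
--         lambda x: x,
--         via_util_rotate90,
--         via_util_rotate180,
--         via_util_rotate270,
--         via_util_flip_horizontal,
--         via_util_flip_vertical
--     ]
--
--     for transform in transformations:
--         transformed_matrix = transform(matrix2)
--         for _ in range(4):
--             if matrix1 == transformed_matrix:
--                 return True
--             transformed_matrix = via_util_rotate90(transformed_matrix)
--
--     return False
-- ===== SOURCE B (Python) =====
-- def via_util_is_same_or_rotate(matrix1, matrix2):
--     def rot90(m):
--         return [list(col) for col in zip(*m[::-1])]
--
--     def canonical(m):
--         images = []
--         for start in (m, [list(reversed(row)) for row in m]):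
--             x = start
--             for _ in range(4):
--                 images.append(x)
--                 x = rot90(x)
--         return min(images)
--
--     return canonical(matrix1) == canonical(matrix2)
-- ===== Notes on version B (the rewrite author's own statement) =====
-- stated objective: alternative
-- what changed: Instead of A's scan over 24 transformed copies of matrix2 with an early return, B computes a canonical representative of each matrix's symmetry orbit (the lexicographic minimum of its 8 rotation/flip images) and compares the two canonical forms.
-- outside the precondition, e.g. on via_util_is_same_or_rotate([[]], []): A returns False, B returns True; on via_util_is_same_or_rotate([[1], [0, 0]], [[1, 0]]): A returns False, B returns True
import Mathlib
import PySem

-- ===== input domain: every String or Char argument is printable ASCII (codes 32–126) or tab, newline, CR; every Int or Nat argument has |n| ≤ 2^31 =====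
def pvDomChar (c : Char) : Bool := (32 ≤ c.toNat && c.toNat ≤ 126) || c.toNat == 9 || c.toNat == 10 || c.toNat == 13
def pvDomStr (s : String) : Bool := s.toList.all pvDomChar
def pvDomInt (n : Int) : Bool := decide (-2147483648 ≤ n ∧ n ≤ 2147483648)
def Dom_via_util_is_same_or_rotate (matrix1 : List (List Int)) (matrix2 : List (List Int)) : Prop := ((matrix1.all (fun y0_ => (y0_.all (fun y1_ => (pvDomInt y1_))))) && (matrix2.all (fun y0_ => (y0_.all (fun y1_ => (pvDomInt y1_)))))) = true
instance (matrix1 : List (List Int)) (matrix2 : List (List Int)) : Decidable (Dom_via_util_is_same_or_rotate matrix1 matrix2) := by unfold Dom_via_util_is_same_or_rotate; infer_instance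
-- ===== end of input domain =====

-- B replaces A's early-return scan over 24 transformed copies of matrix2 by comparing canonical
-- representatives (lexicographic minimum of each matrix's 8 rotation/flip images); same cost class.

-- ===== PORT A =====

-- zip(*ms): take heads while every row is nonempty (Python's zip stops at the shortest row)
def pvZipStar (ms : List (List Int)) : List (List Int) :=
  if hcond : ms ≠ [] ∧ ms.all (fun r => !r.isEmpty) then
    (ms.map (fun r => r.headD 0)) :: pvZipStar (ms.map List.tail)
  else []
termination_by (ms.map List.length).sum
decreasing_by
  obtain ⟨hne, hall⟩ := hcond
  cases ms with
  | nil => exact absurd rfl hne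
  | cons r rest =>
    simp only [List.all_cons, Bool.and_eq_true, Bool.not_eq_true', List.isEmpty_eq_false_iff] at hall
    have h1 : r.tail.length < r.length := by
      cases r with
      | nil => exact absurd rfl hall.1
      | cons a as => simp
    have h2 : (rest.map (fun x => x.tail.length)).sum ≤ (rest.map List.length).sum :=
      List.sum_le_sum (fun x _ => by simp [List.length_tail])
    simp only [List.map_subtype, List.unattach_attach, List.map_cons, List.sum_cons,
      List.map_map, Function.comp_def]
    omega

def via_util_rotate90 (matrix : List (List Int)) : List (List Int) :=
  (pvZipStar matrix).map List.reverse

def via_util_rotate180 (matrix : List (List Int)) : List (List Int) :=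
  matrix.reverse.map List.reverse

def via_util_rotate270 (matrix : List (List Int)) : List (List Int) :=
  pvZipStar matrix.reverse

def via_util_flip_horizontal (matrix : List (List Int)) : List (List Int) :=
  matrix.map List.reverse

def via_util_flip_vertical (matrix : List (List Int)) : List (List Int) :=
  matrix.reverse

-- the inner 'for _ in range(4): if matrix1 == transformed: return True; transformed = rotate90(...)'
def pvInnerLoop (matrix1 : List (List Int)) : Nat → List (List Int) → Bool
  | 0, _ => false
  | k+1, x => if matrix1 = x then true else pvInnerLoop matrix1 k (via_util_rotate90 x)

def via_util_is_same_or_rotate (matrix1 : List (List Int)) (matrix2 : List (List Int)) : Bool :=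
  [fun x => x, via_util_rotate90, via_util_rotate180, via_util_rotate270,
   via_util_flip_horizontal, via_util_flip_vertical].any
    (fun transform => pvInnerLoop matrix1 4 (transform matrix2))

-- ===== PORT B =====

-- B's own rotation: zip(*m[::-1])
def pvRot90B (m : List (List Int)) : List (List Int) := pvZipStar m.reverse

-- Python's lexicographic '<' on lists of ints, and on lists of lists of ints
def pvLtRow : List Int → List Int → Bool
  | _, [] => false
  | [], _ :: _ => true
  | a :: as, b :: bs => if a < b then true else if b < a then false else pvLtRow as bs

def pvLtMat : List (List Int) → List (List Int) → Bool
  | _, [] => false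
  | [], _ :: _ => true
  | a :: as, b :: bs => if pvLtRow a b then true else if pvLtRow b a then false else pvLtMat as bs

-- 'x = start; for _ in range(4): images.append(x); x = rot90(x)'
def pvFour : List (List Int) → Nat → List (List (List Int))
  | _, 0 => []
  | x, k+1 => x :: pvFour (pvRot90B x) k

def pvImages (m : List (List Int)) : List (List (List Int)) :=
  pvFour m 4 ++ pvFour (m.map List.reverse) 4

-- Python's min over a nonempty list (first minimum kept)
def pvMinMat (l : List (List (List Int))) : List (List Int) :=
  match l with
  | [] => []
  | x :: xs => xs.foldl (fun acc y => if pvLtMat y acc then y else acc) x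

def pvCanonical (m : List (List Int)) : List (List Int) := pvMinMat (pvImages m)

def via_util_is_same_or_rotate_alt (matrix1 : List (List Int)) (matrix2 : List (List Int)) : Bool :=
  decide (pvCanonical matrix1 = pvCanonical matrix2)

-- ===== PRECONDITION & SPEC =====

-- a genuine matrix: empty, or rectangular with rows of one positive length
def pvProper (m : List (List Int)) : Prop :=
  m = [] ∨ ((∀ r ∈ m, r.length = (m.headD []).length) ∧ 0 < (m.headD []).length)

-- Pre_ excludes ragged and zero-width matrices, on which the zip-based rotations silently drop
-- entries, so the six transforms are not a symmetry group there and A's answer is an accident of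
-- truncation; B's orbit canonicalization assumes genuine rectangular matrices.
def Pre_via_util_is_same_or_rotate (matrix1 : List (List Int)) (matrix2 : List (List Int)) : Prop :=
  pvProper matrix1 ∧ pvProper matrix2

instance (matrix1 : List (List Int)) (matrix2 : List (List Int)) : Decidable (Pre_via_util_is_same_or_rotate matrix1 matrix2) := by
  unfold Pre_via_util_is_same_or_rotate pvProper; infer_instance

def pvWitness_via_util_is_same_or_rotate : List (List Int) × List (List Int) :=
  ([[1, 2], [3, 4]], [[3, 1], [4, 2]])

def Spec_via_util_is_same_or_rotate (matrix1 : List (List Int)) (matrix2 : List (List Int)) (out : Bool) : Prop := out = via_util_is_same_or_rotate_alt matrix1 matrix2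
instance (matrix1 : List (List Int)) (matrix2 : List (List Int)) (out : Bool) : Decidable (Spec_via_util_is_same_or_rotate matrix1 matrix2 out) := by unfold Spec_via_util_is_same_or_rotate; infer_instance

-- ===== CLAIM (what is proved, stated in full; the proofs are below) =====
def Claim_equal_via_util_is_same_or_rotate : Prop := ∀ (matrix1 : List (List Int)) (matrix2 : List (List Int)), Dom_via_util_is_same_or_rotate matrix1 matrix2 → Pre_via_util_is_same_or_rotate matrix1 matrix2 → Spec_via_util_is_same_or_rotate matrix1 matrix2 (via_util_is_same_or_rotate matrix1 matrix2)

-- ===== LEMMAS AND PROOFS =====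

-- The dihedral group acting on proper matrices, encoded as (mapReverse?, reverse?, zipStar?)
def pvApply (g : Bool × Bool × Bool) (m : List (List Int)) : List (List Int) :=
  let z := if g.2.2 then pvZipStar m else m
  let v := if g.2.1 then z.reverse else z
  if g.1 then v.map List.reverse else v

def pvMul (g h : Bool × Bool × Bool) : Bool × Bool × Bool :=
  let z := if g.2.2 then (h.2.1, h.1, !h.2.2) else h
  let v := if g.2.1 then (z.1, !z.2.1, z.2.2) else z
  if g.1 then (!v.1, v.2.1, v.2.2) else v

theorem pvZipStar_nil : pvZipStar [] = [] := by
  unfold pvZipStar; simp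

theorem proper_of {m : List (List Int)} (c : Nat) (hc : 0 < c)
    (h : ∀ r ∈ m, r.length = c) : pvProper m := by
  cases m with
  | nil => exact Or.inl rfl
  | cons r rest =>
    right
    have hr : r.length = c := h r (List.mem_cons_self ..)
    constructor
    · intro s hs; simp only [List.headD_cons]; rw [h s hs, hr]
    · simp only [List.headD_cons]; omega

theorem pvZipStar_char : ∀ (c : Nat) (m : List (List Int)), m ≠ [] →
    (∀ r ∈ m, r.length = c) →
    pvZipStar m = (List.range c).map (fun i => m.map (fun r => r.getD i 0)) := by
  intro c
  induction c with
  | zero =>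
    intro m hne hc
    rw [pvZipStar, dif_neg]
    · simp
    · rintro ⟨h1, h2⟩
      cases m with
      | nil => exact h1 rfl
      | cons r rest =>
        simp only [List.all_cons, Bool.and_eq_true, Bool.not_eq_true', List.isEmpty_eq_false_iff] at h2
        have hr := hc r (List.mem_cons_self ..)
        cases r with
        | nil => exact h2.1 rfl
        | cons a as => simp at hr
  | succ c ih =>
    intro m hne hc
    rw [pvZipStar, dif_pos]
    · have htne : m.map List.tail ≠ [] := by simpa using hne
      have htc : ∀ r ∈ m.map List.tail, r.length = c := by
        intro r hr
        simp only [List.mem_map] at hr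
        obtain ⟨s, hs, rfl⟩ := hr
        have := hc s hs
        simp [List.length_tail, this]
      rw [ih (m.map List.tail) htne htc, List.range_succ_eq_map]
      simp only [List.map_cons, List.map_map, Function.comp_def]
      refine congrArg₂ List.cons ?_ ?_
      · apply List.map_congr_left
        intro r hr
        have hr' : r.length = c + 1 := hc r hr
        cases r with
        | nil => simp at hr'
        | cons a as => rfl
      · apply List.map_congr_left
        intro i _
        apply List.map_congr_left
        intro r hr
        have hr' : r.length = c + 1 := hc r hr
        cases r with
        | nil => simp at hr'
        | cons a as => rfl
    · refine ⟨hne, ?_⟩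
      rw [List.all_eq_true]
      intro r hr
      have := hc r hr
      cases r with
      | nil => simp at this
      | cons a as => simp

theorem proper_elim {m : List (List Int)} (h : pvProper m) :
    m = [] ∨ (m ≠ [] ∧ ∃ c, 0 < c ∧ ∀ r ∈ m, r.length = c) := by
  rcases h with rfl | ⟨hrow, hpos⟩
  · exact Or.inl rfl
  · cases m with
    | nil => simp at hpos
    | cons r rest =>
      exact Or.inr ⟨by simp, (r :: rest).headD [] |>.length, hpos, hrow⟩

theorem proper_reverse {m : List (List Int)} (h : pvProper m) : pvProper m.reverse := by
  rcases proper_elim h with rfl | ⟨hne, c, hc, hrow⟩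
  · exact Or.inl rfl
  · exact proper_of c hc (fun r hr => hrow r (List.mem_reverse.mp hr))

theorem proper_mapReverse {m : List (List Int)} (h : pvProper m) : pvProper (m.map List.reverse) := by
  rcases proper_elim h with rfl | ⟨hne, c, hc, hrow⟩
  · exact Or.inl rfl
  · refine proper_of c hc ?_
    intro r hr
    simp only [List.mem_map] at hr
    obtain ⟨s, hs, rfl⟩ := hr
    simp [hrow s hs]

theorem proper_zip {m : List (List Int)} (h : pvProper m) : pvProper (pvZipStar m) := by
  rcases proper_elim h with rfl | ⟨hne, c, hc, hrow⟩
  · rw [pvZipStar_nil]; exact Or.inl rfl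
  · rw [pvZipStar_char c m hne hrow]
    have hmne : 0 < m.length := List.length_pos_iff.mpr hne
    refine proper_of m.length hmne ?_
    intro r hr
    simp only [List.mem_map] at hr
    obtain ⟨i, _, rfl⟩ := hr
    simp

theorem pvZ2 {m : List (List Int)} (h : pvProper m) :
    pvZipStar m.reverse = (pvZipStar m).map List.reverse := by
  rcases proper_elim h with rfl | ⟨hne, c, hc, hrow⟩
  · simp [pvZipStar_nil]
  · have hrne : m.reverse ≠ [] := by simpa using hne
    have hrrow : ∀ r ∈ m.reverse, r.length = c := fun r hr => hrow r (List.mem_reverse.mp hr)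
    rw [pvZipStar_char c m.reverse hrne hrrow, pvZipStar_char c m hne hrow]
    simp [List.map_map, Function.comp_def, List.map_reverse]

theorem pvZ3 {m : List (List Int)} (h : pvProper m) :
    pvZipStar (pvZipStar m) = m := by
  rcases proper_elim h with rfl | ⟨hne, c, hc, hrow⟩
  · rw [pvZipStar_nil, pvZipStar_nil]
  · rw [pvZipStar_char c m hne hrow]
    have hmpos : 0 < m.length := List.length_pos_iff.mpr hne
    have hTne : (List.range c).map (fun i => m.map (fun r => r.getD i 0)) ≠ [] := by
      simp only [ne_eq, List.map_eq_nil_iff, List.range_eq_nil]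
      omega
    have hTrow : ∀ r ∈ (List.range c).map (fun i => m.map (fun r => r.getD i 0)),
        r.length = m.length := by
      intro r hr
      simp only [List.mem_map] at hr
      obtain ⟨i, _, rfl⟩ := hr
      simp
    rw [pvZipStar_char m.length _ hTne hTrow]
    apply List.ext_getElem
    · simp
    · intro j h1 h2
      simp only [List.length_map, List.length_range] at h1
      simp only [List.getElem_map, List.getElem_range]
      have hjlen : m[j].length = c := hrow m[j] (List.getElem_mem _)
      apply List.ext_getElem
      · simp [hjlen]
      · intro i hi1 hi2
        simp only [List.length_map, List.length_range] at hi1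
        simp only [List.getElem_map, List.getElem_range]
        rw [List.getD_eq_getElem _ _ (by simpa using h1)]
        simp only [List.getElem_map]
        rw [List.getD_eq_getElem _ _ (by omega)]

theorem pvZ1 {m : List (List Int)} (h : pvProper m) :
    pvZipStar (m.map List.reverse) = (pvZipStar m).reverse := by
  have hMr : m.map List.reverse = pvZipStar ((pvZipStar m).reverse) := by
    rw [pvZ2 (proper_zip h), pvZ3 h]
  rw [hMr, pvZ3 (proper_reverse (proper_zip h))]

theorem push_Mr (g : Bool × Bool × Bool) (m : List (List Int)) :
    (pvApply g m).map List.reverse = pvApply (!g.1, g.2.1, g.2.2) m := by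
  rcases g with ⟨b1, b2, b3⟩
  cases b1 <;> simp [pvApply, List.map_map]

theorem push_Rv (g : Bool × Bool × Bool) (m : List (List Int)) :
    (pvApply g m).reverse = pvApply (g.1, !g.2.1, g.2.2) m := by
  rcases g with ⟨b1, b2, b3⟩
  cases b1 <;> cases b2 <;> simp [pvApply, List.map_reverse, List.reverse_reverse]

theorem push_Z {m : List (List Int)} (h : pvProper m) (g : Bool × Bool × Bool) :
    pvZipStar (pvApply g m) = pvApply (g.2.1, g.1, !g.2.2) m := by
  rcases g with ⟨b1, b2, b3⟩
  have hx : pvProper (if b3 then pvZipStar m else m) := by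
    cases b3 <;> simp [proper_zip h, h]
  have hZx : pvZipStar (if b3 then pvZipStar m else m) = (if b3 then m else pvZipStar m) := by
    cases b3 <;> simp [pvZ3 h]
  cases b1 <;> cases b2
  · show pvZipStar (if b3 then pvZipStar m else m) = _
    rw [hZx]; cases b3 <;> rfl
  · show pvZipStar ((if b3 then pvZipStar m else m).reverse) = _
    rw [pvZ2 hx, hZx]; cases b3 <;> rfl
  · show pvZipStar ((if b3 then pvZipStar m else m).map List.reverse) = _
    rw [pvZ1 hx, hZx]; cases b3 <;> rfl
  · show pvZipStar (((if b3 then pvZipStar m else m).reverse).map List.reverse) = _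
    rw [pvZ1 (proper_reverse hx), pvZ2 hx, hZx]
    cases b3 <;> simp [pvApply, List.map_reverse]

theorem apply_mul {m : List (List Int)} (h : pvProper m) (g k : Bool × Bool × Bool) :
    pvApply g (pvApply k m) = pvApply (pvMul g k) m := by
  rcases g with ⟨b1, b2, b3⟩
  cases b1 <;> cases b2 <;> cases b3
  · rfl
  · show pvZipStar (pvApply k m) = _
    rw [push_Z h]; rfl
  · show (pvApply k m).reverse = _
    rw [push_Rv]; rfl
  · show (pvZipStar (pvApply k m)).reverse = _
    rw [push_Z h, push_Rv]; rfl
  · show (pvApply k m).map List.reverse = _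
    rw [push_Mr]; rfl
  · show (pvZipStar (pvApply k m)).map List.reverse = _
    rw [push_Z h, push_Mr]; rfl
  · show ((pvApply k m).reverse).map List.reverse = _
    rw [push_Rv, push_Mr]; rfl
  · show ((pvZipStar (pvApply k m)).reverse).map List.reverse = _
    rw [push_Z h, push_Rv, push_Mr]; rfl

theorem apply_id (m : List (List Int)) : pvApply (false, false, false) m = m := rfl

theorem rA_apply {m : List (List Int)} (h : pvProper m) (g : Bool × Bool × Bool) :
    via_util_rotate90 (pvApply g m) = pvApply (pvMul (true, false, true) g) m := by
  show (pvZipStar (pvApply g m)).map List.reverse = _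
  rw [push_Z h, push_Mr]; rfl

theorem rB_apply {m : List (List Int)} (h : pvProper m) (g : Bool × Bool × Bool) :
    pvRot90B (pvApply g m) = pvApply (pvMul (true, false, true) g) m := by
  show pvZipStar ((pvApply g m).reverse) = _
  rw [push_Rv, push_Z h]; rfl

theorem apply_proper {m : List (List Int)} (h : pvProper m) (g : Bool × Bool × Bool) :
    pvProper (pvApply g m) := by
  rcases g with ⟨b1, b2, b3⟩
  have h3 : pvProper (if b3 then pvZipStar m else m) := by
    cases b3 <;> simp [proper_zip h, h]
  have h2' : pvProper (if b2 then (if b3 then pvZipStar m else m).reverse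
      else (if b3 then pvZipStar m else m)) := by
    cases b2 <;> simp [proper_reverse h3, h3]
  show pvProper (if b1 then (if b2 then (if b3 then pvZipStar m else m).reverse
      else (if b3 then pvZipStar m else m)).map List.reverse else _)
  cases b1 <;> simp [proper_mapReverse h2', h2']

theorem inner_iff (m1 : List (List Int)) : ∀ (k : Nat) (x : List (List Int)),
    pvInnerLoop m1 k x = true ↔ ∃ j < k, m1 = via_util_rotate90^[j] x := by
  intro k
  induction k with
  | zero => intro x; simp [pvInnerLoop]
  | succ k ih =>
    intro x
    by_cases hx : m1 = x
    · simp only [pvInnerLoop, if_pos hx]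
      exact ⟨fun _ => ⟨0, by omega, by simpa using hx⟩, fun _ => trivial⟩
    · rw [show pvInnerLoop m1 (k+1) x = pvInnerLoop m1 k (via_util_rotate90 x) from by
        simp [pvInnerLoop, hx], ih]
      constructor
      · rintro ⟨j, hj, rfl⟩
        exact ⟨j + 1, by omega, by rw [Function.iterate_succ_apply]⟩
      · rintro ⟨j, hj, hval⟩
        cases j with
        | zero => simp at hval; exact absurd hval hx
        | succ j =>
          rw [Function.iterate_succ_apply] at hval
          exact ⟨j, by omega, hval⟩

theorem iterA_apply {m : List (List Int)} (h : pvProper m) :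
    ∀ (j : Nat) (g : Bool × Bool × Bool),
    via_util_rotate90^[j] (pvApply g m) = pvApply ((pvMul (true, false, true))^[j] g) m := by
  intro j
  induction j with
  | zero => intro g; simp
  | succ j ih =>
    intro g
    rw [Function.iterate_succ_apply, Function.iterate_succ_apply, rA_apply h, ih]

theorem portA_iff {m1 m2 : List (List Int)} (h2 : pvProper m2) :
    via_util_is_same_or_rotate m1 m2 = true ↔ ∃ g, m1 = pvApply g m2 := by
  unfold via_util_is_same_or_rotate
  rw [List.any_eq_true]
  constructor
  · rintro ⟨t, ht, hloop⟩
    rw [inner_iff] at hloop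
    obtain ⟨j, hj, rfl⟩ := hloop
    simp only [List.mem_cons, List.not_mem_nil, or_false] at ht
    rcases ht with rfl | rfl | rfl | rfl | rfl | rfl
    · exact ⟨_, by rw [show (fun x => x) m2 = pvApply (false, false, false) m2 from rfl,
        iterA_apply h2]⟩
    · exact ⟨_, by rw [show via_util_rotate90 m2 = pvApply (pvMul (true, false, true)
        (false, false, false)) m2 from rA_apply h2 (false, false, false), iterA_apply h2]⟩
    · exact ⟨_, by rw [show via_util_rotate180 m2 = pvApply (true, true, false) m2 from rfl,
        iterA_apply h2]⟩
    · exact ⟨_, by rw [show via_util_rotate270 m2 = pvZipStar (pvApply (false, true, false) m2)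
        from rfl, push_Z h2, iterA_apply h2]⟩
    · exact ⟨_, by rw [show via_util_flip_horizontal m2 = pvApply (true, false, false) m2 from rfl,
        iterA_apply h2]⟩
    · exact ⟨_, by rw [show via_util_flip_vertical m2 = pvApply (false, true, false) m2 from rfl,
        iterA_apply h2]⟩
  · rintro ⟨g, rfl⟩
    have hsur : ∀ g : Bool × Bool × Bool, ∃ j < 4,
        (pvMul (true, false, true))^[j] (false, false, false) = g ∨
        (pvMul (true, false, true))^[j] (true, false, false) = g := by decide
    obtain ⟨j, hj, hcase⟩ := hsur g
    rcases hcase with hgj | hgj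
    · refine ⟨fun x => x, List.mem_cons_self .., ?_⟩
      rw [inner_iff]
      exact ⟨j, hj, by rw [show (fun x => x) m2 = pvApply (false, false, false) m2 from rfl,
        iterA_apply h2, hgj]⟩
    · refine ⟨via_util_flip_horizontal, by simp, ?_⟩
      rw [inner_iff]
      exact ⟨j, hj, by rw [show via_util_flip_horizontal m2 = pvApply (true, false, false) m2
        from rfl, iterA_apply h2, hgj]⟩

theorem images_mem_iff {m : List (List Int)} (h : pvProper m) (x : List (List Int)) :
    x ∈ pvImages m ↔ ∃ g, x = pvApply g m := by
  have a0 : m = pvApply (false, false, false) m := rfl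
  have a1 := rB_apply h (false, false, false)
  rw [apply_id] at a1
  have a2 := rB_apply h (pvMul (true, false, true) (false, false, false))
  rw [← a1] at a2
  have a3 := rB_apply h (pvMul (true, false, true) (pvMul (true, false, true)
    (false, false, false)))
  rw [← a2] at a3
  have b0 : m.map List.reverse = pvApply (true, false, false) m := rfl
  have b1 := rB_apply h (true, false, false)
  rw [← b0] at b1
  have b2 := rB_apply h (pvMul (true, false, true) (true, false, false))
  rw [← b1] at b2
  have b3 := rB_apply h (pvMul (true, false, true) (pvMul (true, false, true)
    (true, false, false)))
  rw [← b2] at b3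
  constructor
  · intro hx
    simp only [pvImages, pvFour, List.mem_append, List.mem_cons, List.not_mem_nil,
      or_false] at hx
    rcases hx with (rfl | rfl | rfl | rfl) | (rfl | rfl | rfl | rfl)
    exacts [⟨_, a0⟩, ⟨_, a1⟩, ⟨_, a2⟩, ⟨_, a3⟩, ⟨_, b0⟩, ⟨_, b1⟩, ⟨_, b2⟩, ⟨_, b3⟩]
  · rintro ⟨g, rfl⟩
    have hcov : ∀ g : Bool × Bool × Bool,
        g = (false, false, false) ∨
        g = pvMul (true, false, true) (false, false, false) ∨
        g = pvMul (true, false, true) (pvMul (true, false, true) (false, false, false)) ∨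
        g = pvMul (true, false, true) (pvMul (true, false, true) (pvMul (true, false, true)
          (false, false, false))) ∨
        g = (true, false, false) ∨
        g = pvMul (true, false, true) (true, false, false) ∨
        g = pvMul (true, false, true) (pvMul (true, false, true) (true, false, false)) ∨
        g = pvMul (true, false, true) (pvMul (true, false, true) (pvMul (true, false, true)
          (true, false, false))) := by decide
    rcases hcov g with rfl | rfl | rfl | rfl | rfl | rfl | rfl | rfl
    · rw [← a0]; simp [pvImages, pvFour]
    · rw [← a1]; simp [pvImages, pvFour]
    · rw [← a2]; simp [pvImages, pvFour]
    · rw [← a3]; simp [pvImages, pvFour]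
    · rw [← b0]; simp [pvImages, pvFour]
    · rw [← b1]; simp [pvImages, pvFour]
    · rw [← b2]; simp [pvImages, pvFour]
    · rw [← b3]; simp [pvImages, pvFour]

theorem ltRow_asymm : ∀ {a b : List Int}, pvLtRow a b = true → pvLtRow b a = false := by
  intro a
  induction a with
  | nil =>
    intro b hab
    cases b with
    | nil => simp [pvLtRow] at hab
    | cons y ys => rfl
  | cons x xs ih =>
    intro b hab
    cases b with
    | nil => simp [pvLtRow] at hab
    | cons y ys =>
      by_cases hxy : x < y
      · have hyx : ¬ y < x := by omega
        simp [pvLtRow, hxy, hyx]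
      · by_cases hyx : y < x
        · simp [pvLtRow, hxy, hyx] at hab
        · simp only [pvLtRow, if_neg hxy, if_neg hyx] at hab
          simp [pvLtRow, if_neg hyx, ih hab]

theorem ltRow_eq_of_not : ∀ {a b : List Int}, pvLtRow a b = false → pvLtRow b a = false → a = b := by
  intro a
  induction a with
  | nil =>
    intro b hab hba
    cases b with
    | nil => rfl
    | cons y ys => simp [pvLtRow] at hab
  | cons x xs ih =>
    intro b hab hba
    cases b with
    | nil => simp [pvLtRow] at hba
    | cons y ys =>
      by_cases hxy : x < y
      · simp [pvLtRow, hxy] at hab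
      · by_cases hyx : y < x
        · simp [pvLtRow, hyx] at hba
        · have hx : x = y := by omega
          simp only [pvLtRow, if_neg hxy, if_neg hyx] at hab
          rw [hx, ih hab (by simpa only [pvLtRow, if_neg hyx, if_neg hxy] using hba)]

theorem ltRow_trans : ∀ {a b c : List Int}, pvLtRow a b = true → pvLtRow b c = true → pvLtRow a c = true := by
  intro a
  induction a with
  | nil =>
    intro b c hab hbc
    cases b with
    | nil => simp [pvLtRow] at hab
    | cons y ys =>
      cases c with
      | nil => simp [pvLtRow] at hbc
      | cons z zs => rfl
  | cons x xs ih =>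
    intro b c hab hbc
    cases b with
    | nil => simp [pvLtRow] at hab
    | cons y ys =>
      cases c with
      | nil => simp [pvLtRow] at hbc
      | cons z zs =>
        simp only [pvLtRow] at hab hbc ⊢
        by_cases h1 : x < y
        · by_cases h2 : y < z
          · have h3 : x < z := by omega
            simp [h3]
          · by_cases h2' : z < y
            · simp [h2, h2'] at hbc
            · have hyz : y = z := by omega
              subst hyz
              simp [h1]
        · by_cases h1' : y < x
          · simp [h1, h1'] at hab
          · have hxy : x = y := by omega
            subst hxy
            rw [if_neg h1, if_neg h1'] at hab
            by_cases h2 : x < z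
            · simp [h2]
            · by_cases h2' : z < x
              · simp [h2, h2'] at hbc
              · rw [if_neg h2, if_neg h2'] at hbc ⊢
                exact ih hab hbc

theorem ltMat_asymm : ∀ {a b : List (List Int)}, pvLtMat a b = true → pvLtMat b a = false := by
  intro a
  induction a with
  | nil =>
    intro b hab
    cases b with
    | nil => simp [pvLtMat] at hab
    | cons y ys => rfl
  | cons x xs ih =>
    intro b hab
    cases b with
    | nil => simp [pvLtMat] at hab
    | cons y ys =>
      by_cases hxy : pvLtRow x y = true
      · have hyx : pvLtRow y x = false := ltRow_asymm hxy
        simp [pvLtMat, hxy, hyx]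
      · have hxy' : pvLtRow x y = false := by simpa using hxy
        by_cases hyx : pvLtRow y x = true
        · simp [pvLtMat, hxy', hyx] at hab
        · have hyx' : pvLtRow y x = false := by simpa using hyx
          simp only [pvLtMat, hxy', hyx'] at hab
          simp [pvLtMat, hxy', hyx', ih hab]

theorem ltMat_eq_of_not : ∀ {a b : List (List Int)}, pvLtMat a b = false → pvLtMat b a = false → a = b := by
  intro a
  induction a with
  | nil =>
    intro b hab hba
    cases b with
    | nil => rfl
    | cons y ys => simp [pvLtMat] at hab
  | cons x xs ih =>
    intro b hab hba
    cases b with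
    | nil => simp [pvLtMat] at hba
    | cons y ys =>
      by_cases hxy : pvLtRow x y = true
      · simp [pvLtMat, hxy] at hab
      · have hxy' : pvLtRow x y = false := by simpa using hxy
        by_cases hyx : pvLtRow y x = true
        · simp [pvLtMat, hyx] at hba
        · have hyx' : pvLtRow y x = false := by simpa using hyx
          have hrow : x = y := ltRow_eq_of_not hxy' hyx'
          simp only [pvLtMat, hxy', hyx'] at hab hba
          rw [hrow, ih hab hba]

theorem ltMat_irrefl (a : List (List Int)) : pvLtMat a a = false := by
  cases h : pvLtMat a a
  · rfl
  · have h2 := ltMat_asymm h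
    rw [h] at h2
    exact h2

theorem ltMat_trans : ∀ {a b c : List (List Int)}, pvLtMat a b = true → pvLtMat b c = true → pvLtMat a c = true := by
  intro a
  induction a with
  | nil =>
    intro b c hab hbc
    cases b with
    | nil => simp [pvLtMat] at hab
    | cons y ys =>
      cases c with
      | nil => simp [pvLtMat] at hbc
      | cons z zs => rfl
  | cons x xs ih =>
    intro b c hab hbc
    cases b with
    | nil => simp [pvLtMat] at hab
    | cons y ys =>
      cases c with
      | nil => simp [pvLtMat] at hbc
      | cons z zs =>
        simp only [pvLtMat] at hab hbc ⊢
        by_cases h1 : pvLtRow x y = true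
        · by_cases h2 : pvLtRow y z = true
          · simp [ltRow_trans h1 h2]
          · by_cases h2' : pvLtRow z y = true
            · simp [h2, h2'] at hbc
            · have hyz : y = z := ltRow_eq_of_not (by simpa using h2) (by simpa using h2')
              subst hyz
              simp [h1]
        · by_cases h1' : pvLtRow y x = true
          · simp [h1, h1'] at hab
          · have hxy : x = y := ltRow_eq_of_not (by simpa using h1) (by simpa using h1')
            subst hxy
            rw [if_neg h1, if_neg h1'] at hab
            by_cases h2 : pvLtRow x z = true
            · simp [h2]
            · by_cases h2' : pvLtRow z x = true
              · simp [h2, h2'] at hbc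
              · rw [if_neg h2, if_neg h2'] at hbc ⊢
                exact ih hab hbc

theorem fmin_spec : ∀ (xs : List (List (List Int))) (acc : List (List Int)),
    (xs.foldl (fun acc y => if pvLtMat y acc then y else acc) acc = acc ∨
     xs.foldl (fun acc y => if pvLtMat y acc then y else acc) acc ∈ xs) ∧
    (∀ y, (y = acc ∨ y ∈ xs) →
     pvLtMat y (xs.foldl (fun acc y => if pvLtMat y acc then y else acc) acc) = false) := by
  intro xs
  induction xs with
  | nil =>
    intro acc
    refine ⟨Or.inl rfl, ?_⟩
    rintro y (rfl | hy)
    · exact ltMat_irrefl y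
    · simp at hy
  | cons z rest ih =>
    intro acc
    simp only [List.foldl_cons]
    obtain ⟨ihmem, ihle⟩ := ih (if pvLtMat z acc then z else acc)
    constructor
    · rcases ihmem with heq | hmem
      · rw [heq]
        by_cases hz : pvLtMat z acc = true
        · rw [if_pos hz]
          exact Or.inr (List.mem_cons_self ..)
        · rw [if_neg hz]
          exact Or.inl rfl
      · exact Or.inr (List.mem_cons_of_mem _ hmem)
    · have hres := ihle (if pvLtMat z acc then z else acc) (Or.inl rfl)
      rintro y (rfl | hy)
      · by_cases hz : pvLtMat z y = true
        · rw [if_pos hz] at hres ⊢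
          cases hacc : pvLtMat y (rest.foldl (fun acc y => if pvLtMat y acc then y else acc) z) with
          | false => rfl
          | true =>
            have h3 := ltMat_trans hz hacc
            rw [hres] at h3
            exact h3.symm
        · rw [if_neg hz] at hres ⊢
          exact hres
      · rcases List.mem_cons.mp hy with rfl | hy'
        · by_cases hz : pvLtMat y acc = true
          · rw [if_pos hz] at hres ⊢
            exact hres
          · have hza : pvLtMat y acc = false := by simpa using hz
            rw [if_neg hz] at hres ⊢
            cases hy2 : pvLtMat y (rest.foldl (fun acc y => if pvLtMat y acc then y else acc) acc) with
            | false => rfl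
            | true =>
              by_cases hay : pvLtMat acc y = true
              · have h3 := ltMat_trans hay hy2
                rw [hres] at h3
                exact h3.symm
              · have heq : acc = y := ltMat_eq_of_not (by simpa using hay) hza
                rw [← heq, hres] at hy2
                exact hy2.symm
        · exact ihle y (Or.inr hy')

theorem min_mem {l : List (List (List Int))} (h : l ≠ []) : pvMinMat l ∈ l := by
  cases l with
  | nil => exact absurd rfl h
  | cons x xs =>
    rcases (fmin_spec xs x).1 with heq | hmem
    · rw [pvMinMat, heq]
      exact List.mem_cons_self ..
    · exact List.mem_cons_of_mem _ hmem

theorem min_le {l : List (List (List Int))} : ∀ y ∈ l, pvLtMat y (pvMinMat l) = false := by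
  intro y hy
  cases l with
  | nil => simp at hy
  | cons x xs =>
    rcases List.mem_cons.mp hy with rfl | hy'
    · exact (fmin_spec xs y).2 y (Or.inl rfl)
    · exact (fmin_spec xs x).2 y (Or.inr hy')

theorem min_eq_of_same_mem {l1 l2 : List (List (List Int))} (h1 : l1 ≠ []) (h2 : l2 ≠ [])
    (h : ∀ x, x ∈ l1 ↔ x ∈ l2) : pvMinMat l1 = pvMinMat l2 := by
  have m1mem : pvMinMat l1 ∈ l2 := (h _).mp (min_mem h1)
  have m2mem : pvMinMat l2 ∈ l1 := (h _).mpr (min_mem h2)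
  exact ltMat_eq_of_not (min_le _ m1mem) (min_le _ m2mem)

theorem images_ne_nil (m : List (List Int)) : pvImages m ≠ [] := by
  simp [pvImages, pvFour]

theorem canonical_eq_iff {m1 m2 : List (List Int)} (h1 : pvProper m1) (h2 : pvProper m2) :
    pvCanonical m1 = pvCanonical m2 ↔ ∃ g, m1 = pvApply g m2 := by
  constructor
  · intro hc
    simp only [pvCanonical] at hc
    obtain ⟨g1, hg1⟩ := (images_mem_iff h1 _).mp (min_mem (images_ne_nil m1))
    obtain ⟨g2, hg2⟩ := (images_mem_iff h2 _).mp (min_mem (images_ne_nil m2))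
    have hinv : ∀ g : Bool × Bool × Bool, ∃ gi, pvMul gi g = (false, false, false) := by decide
    obtain ⟨g1i, hg1i⟩ := hinv g1
    refine ⟨pvMul g1i g2, ?_⟩
    have hm1 : m1 = pvApply g1i (pvMinMat (pvImages m1)) := by
      rw [hg1, apply_mul h1, hg1i, apply_id]
    rw [hm1, hc, hg2, apply_mul h2]
  · rintro ⟨g0, rfl⟩
    simp only [pvCanonical]
    apply min_eq_of_same_mem (images_ne_nil _) (images_ne_nil _)
    intro x
    rw [images_mem_iff (apply_proper h2 g0) x, images_mem_iff h2 x]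
    constructor
    · rintro ⟨g, rfl⟩
      exact ⟨pvMul g g0, apply_mul h2 g g0⟩
    · rintro ⟨g, rfl⟩
      have hsur2 : ∀ g0 g : Bool × Bool × Bool, ∃ gq, pvMul gq g0 = g := by decide
      obtain ⟨gq, hgq⟩ := hsur2 g0 g
      exact ⟨gq, by rw [apply_mul h2, hgq]⟩

-- ===== VERDICT (by name: the statement is the Claim_ definition above) =====
theorem via_util_is_same_or_rotate_spec : Claim_equal_via_util_is_same_or_rotate := by
  intro m1 m2 _ hpre
  unfold Spec_via_util_is_same_or_rotate via_util_is_same_or_rotate_alt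
  rw [Bool.eq_iff_iff]
  rw [portA_iff hpre.2, decide_eq_true_iff]
  exact (canonical_eq_iff hpre.1 hpre.2).symm
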